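-- pv_equiv track=rewrite | github.com/franckalbinet/blog | post_utils.py | add_heading_anchors
-- ===== SOURCE A (Python) =====
-- def add_heading_anchors(content: str) -> str:
--     """Add anchor elements before each h2 heading in markdown content."""
--     lines = content.split('\n')
--     processed_lines = []
--
--     for line in lines:
--         if line.startswith('## '):
--             # Extract the heading text
--             heading = line[3:].strip()
--             # Create the anchor ID
--             anchor = heading.lower().replace(' ', '-')
--             # Add the anchor element before the heading
--             processed_lines.append(f'<a id="{anchor}"></a>')
--         processed_lines.append(line)
--
--     return '\n'.join(processed_lines)
-- ===== SOURCE B (Python) =====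
-- def add_heading_anchors(content: str) -> str:
--     """Add anchor elements before each h2 heading in markdown content."""
--     out = []
--     i = 0
--     n = len(content)
--     at_start = True
--     while i < n:
--         if at_start and content.startswith('## ', i):
--             j = content.find('\n', i)
--             if j == -1:
--                 j = n
--             body = content[i + 3:j]
--             anchor = body.strip().lower().replace(' ', '-')
--             out.append(f'<a id="{anchor}"></a>\n')
--             out.append(content[i:j])
--             i = j
--             at_start = False
--         else:
--             c = content[i]
--             out.append(c)
--             at_start = (c == '\n')
--             i += 1
--     return ''.join(out)
-- ===== Notes on version B (the rewrite author's own statement) =====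
-- stated objective: alternative
-- what changed: B makes one left-to-right scan over the whole string with a line-start flag, splicing each anchor in place at a '## ' line start, instead of A's split('\n') / per-line loop with an accumulator list / join('\n').
import Mathlib
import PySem

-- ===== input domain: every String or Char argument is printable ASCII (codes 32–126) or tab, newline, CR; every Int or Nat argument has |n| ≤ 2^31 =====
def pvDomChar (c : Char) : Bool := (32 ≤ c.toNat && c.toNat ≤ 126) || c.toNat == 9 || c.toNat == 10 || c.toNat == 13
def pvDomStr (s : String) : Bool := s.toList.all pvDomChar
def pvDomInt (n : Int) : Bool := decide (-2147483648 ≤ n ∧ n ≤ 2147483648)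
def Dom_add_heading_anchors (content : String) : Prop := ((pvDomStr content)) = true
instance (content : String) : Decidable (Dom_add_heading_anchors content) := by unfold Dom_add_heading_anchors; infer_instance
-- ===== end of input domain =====

-- B replaces A's split('\n') / per-line loop / join('\n') with one left-to-right scan of the
-- whole string keeping a line-start flag and splicing anchors in place (objective: alternative,
-- same O(n) cost).

-- ===== PORT A =====
-- split('\n'), loop over the lines appending anchor lines before '## ' headings, join('\n').
def add_heading_anchors (content : String) : String :=
  let lines := PySem.Chars.splitOn content.toList ['\n']
  let processed := lines.foldl (fun acc line =>
    let acc :=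
      if PySem.Chars.startswith line ['#', '#', ' '] then
        -- heading = line[3:].strip()
        let heading := PySem.Chars.strip (PySem.Chars.slice line (some 3) none)
        -- anchor = heading.lower().replace(' ', '-')
        let anchor := PySem.Chars.replace (PySem.Chars.lower heading) [' '] ['-']
        acc ++ ["<a id=\"".toList ++ anchor ++ "\"></a>".toList]
      else acc
    acc ++ [line]) []
  String.ofList (PySem.Chars.join ['\n'] processed)

-- ===== PORT B =====
-- the while-loop of Source B: scan the characters once; `atStart` is Source B's at_start flag; at a
-- line start matching '## ' emit the anchor line and the heading text up to the next '\n'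
-- (Source B's content[i:j] with j = content.find('\n', i)), otherwise copy one character.
def pvScanSub (atStart : Bool) (cs : List Char) : List Char :=
  match cs with
  | [] => []
  | c :: rest =>
    if atStart && (c == '#') && (rest.take 2 == ['#', ' ']) then
      let body := (rest.drop 2).takeWhile (fun d => d ≠ '\n')
      let anchor := PySem.Chars.replace (PySem.Chars.lower (PySem.Chars.strip body)) [' '] ['-']
      "<a id=\"".toList ++ anchor ++ "\"></a>".toList ++ ['\n']
        ++ ('#' :: '#' :: ' ' :: body) ++ pvScanSub false ((rest.drop 2).dropWhile (fun d => d ≠ '\n'))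
    else
      c :: pvScanSub (c == '\n') rest
termination_by cs.length
decreasing_by
  · have h1 := List.length_dropWhile_le (fun d => d ≠ '\n') (rest.drop 2)
    have h2 : (rest.drop 2).length ≤ rest.length := by simp
    simp only [List.length_cons]; omega
  · simp

def add_heading_anchors_alt (content : String) : String :=
  String.ofList (pvScanSub true content.toList)

-- ===== PRECONDITION & SPEC =====
def Spec_add_heading_anchors (content : String) (out : String) : Prop := out = add_heading_anchors_alt content
instance (content : String) (out : String) : Decidable (Spec_add_heading_anchors content out) := by unfold Spec_add_heading_anchors; infer_instance

-- ===== CLAIM (what is proved, stated in full; the proofs are below) =====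
def Claim_equal_add_heading_anchors : Prop := ∀ (content : String), Dom_add_heading_anchors content → Spec_add_heading_anchors content (add_heading_anchors content)

-- ===== LEMMAS AND PROOFS =====

-- reference splitter: Python's split('\n') as a structural recursion
def pvSplitNL : List Char → List (List Char)
  | [] => [[]]
  | c :: r =>
    if c = '\n' then [] :: pvSplitNL r
    else
      match pvSplitNL r with
      | [] => [[c]]
      | x :: xs => (c :: x) :: xs

def pvConsHead (p : List Char) : List (List Char) → List (List Char)
  | [] => [p]
  | x :: xs => (p ++ x) :: xs

theorem pvSplitNL_ne_nil (cs : List Char) : pvSplitNL cs ≠ [] := by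
  cases cs with
  | nil => simp [pvSplitNL]
  | cons c r =>
    simp only [pvSplitNL]
    split
    · simp
    · cases h : pvSplitNL r <;> simp

theorem pvSplitOn_go_spec (fuel : Nat) (l cur : List Char) (acc : List (List Char))
    (h : l.length ≤ fuel) :
    PySem.Chars.splitOn.go ['\n'] fuel l cur acc
      = acc.reverse ++ pvConsHead cur.reverse (pvSplitNL l) := by
  induction fuel generalizing l cur acc with
  | zero =>
    have : l = [] := by cases l <;> simp_all
    subst this
    simp [PySem.Chars.splitOn.go, pvSplitNL, pvConsHead]
  | succ fuel ih =>
    cases l with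
    | nil => simp [PySem.Chars.splitOn.go, pvSplitNL, pvConsHead]
    | cons c rest =>
      simp only [PySem.Chars.splitOn.go]
      by_cases hc : c = '\n'
      · subst hc
        have hpre : List.isPrefixOf ['\n'] ('\n' :: rest) = true := by
          simp [List.isPrefixOf]
        rw [if_pos hpre]
        have hd : List.drop ['\n'].length ('\n' :: rest) = rest := by simp
        rw [hd, ih rest [] ((cur.reverse) :: acc) (by simp at h ⊢; omega)]
        simp [pvSplitNL, pvConsHead]
        cases hs : pvSplitNL rest with
        | nil => exact absurd hs (pvSplitNL_ne_nil rest)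
        | cons x xs => simp
      · have hpre : ¬ List.isPrefixOf ['\n'] (c :: rest) = true := by
          simp [List.isPrefixOf]; exact fun h' => hc h'.symm
        rw [if_neg hpre]
        rw [ih rest (c :: cur) acc (by simp at h ⊢; omega)]
        simp only [pvSplitNL, if_neg hc]
        cases hs : pvSplitNL rest with
        | nil => exact absurd hs (pvSplitNL_ne_nil rest)
        | cons x xs => simp [pvConsHead]

theorem pvSplitOn_eq (cs : List Char) :
    PySem.Chars.splitOn cs ['\n'] = pvSplitNL cs := by
  have := pvSplitOn_go_spec (cs.length + 1) cs [] [] (by omega)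
  simp only [PySem.Chars.splitOn, this]
  cases hs : pvSplitNL cs with
  | nil => exact absurd hs (pvSplitNL_ne_nil cs)
  | cons x xs => simp [pvConsHead]

theorem pvSplitNL_join (cs : List Char) :
    PySem.Chars.join ['\n'] (pvSplitNL cs) = cs := by
  induction cs with
  | nil => simp [pvSplitNL, PySem.Chars.join_singleton]
  | cons c r ih =>
    simp only [pvSplitNL]
    by_cases hc : c = '\n'
    · subst hc
      rw [if_pos rfl]
      cases hs : pvSplitNL r with
      | nil => exact absurd hs (pvSplitNL_ne_nil r)
      | cons x xs =>
        rw [hs] at ih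
        rw [PySem.Chars.join_cons_cons]
        simp [ih]
    · rw [if_neg hc]
      cases hs : pvSplitNL r with
      | nil => exact absurd hs (pvSplitNL_ne_nil r)
      | cons x xs =>
        rw [hs] at ih
        cases xs with
        | nil => simp_all [PySem.Chars.join_singleton]
        | cons y ys =>
          rw [PySem.Chars.join_cons_cons] at ih ⊢
          simp [ih]

theorem pvSplitNL_no_nl (cs : List Char) : ∀ l ∈ pvSplitNL cs, '\n' ∉ l := by
  induction cs with
  | nil => simp [pvSplitNL]
  | cons c r ih =>
    simp only [pvSplitNL]
    by_cases hc : c = '\n'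
    · subst hc; rw [if_pos rfl]
      intro l hl
      rcases List.mem_cons.mp hl with h | h
      · simp [h]
      · exact ih l h
    · rw [if_neg hc]
      cases hs : pvSplitNL r with
      | nil => exact absurd hs (pvSplitNL_ne_nil r)
      | cons x xs =>
        rw [hs] at ih
        intro l hl
        rcases List.mem_cons.mp hl with h | h
        · subst h
          intro hmem
          rcases List.mem_cons.mp hmem with h' | h'
          · exact hc h'.symm
          · exact ih x (List.mem_cons_self ..) h'
        · exact ih l (List.mem_cons_of_mem _ h)

-- per-line output of A's loop body
def pvLineOut (line : List Char) : List (List Char) :=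
  if PySem.Chars.startswith line ['#', '#', ' '] then
    ["<a id=\"".toList
       ++ PySem.Chars.replace (PySem.Chars.lower (PySem.Chars.strip (line.drop 3))) [' '] ['-']
       ++ "\"></a>".toList,
     line]
  else [line]

theorem pvFoldl_flatMap (lines : List (List Char)) (acc : List (List Char)) :
    lines.foldl (fun acc line =>
      let acc :=
        if PySem.Chars.startswith line ['#', '#', ' '] then
          let heading := PySem.Chars.strip (PySem.Chars.slice line (some 3) none)
          let anchor := PySem.Chars.replace (PySem.Chars.lower heading) [' '] ['-']
          acc ++ ["<a id=\"".toList ++ anchor ++ "\"></a>".toList]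
        else acc
      acc ++ [line]) acc = acc ++ lines.flatMap pvLineOut := by
  induction lines generalizing acc with
  | nil => simp
  | cons l ls ih =>
    simp only [List.foldl_cons, List.flatMap_cons, ih]
    have hsl : PySem.List.slice l (some 3) none = l.drop 3 := by
      have := PySem.List.slice_from (a := (3 : Int)) l (by norm_num)
      simpa using this
    unfold pvLineOut
    by_cases hs : PySem.Chars.startswith l ['#', '#', ' '] = true
    · simp [hs, hsl]
    · simp [hs]

theorem pvScan_false_app (m cs : List Char) (hm : '\n' ∉ m) :
    pvScanSub false (m ++ cs) = m ++ pvScanSub false cs := by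
  induction m with
  | nil => simp
  | cons c m ih =>
    rw [List.cons_append, pvScanSub]
    have hc : c ≠ '\n' := fun h => hm (h ▸ List.mem_cons_self)
    have hcb : (c == '\n') = false := by simp [hc]
    rw [hcb, ih (fun h => hm (List.mem_cons_of_mem _ h))]
    simp

theorem pvScan_false_nl (T : List Char) :
    pvScanSub false ('\n' :: T) = '\n' :: pvScanSub true T := by
  rw [pvScanSub]; simp

theorem pvTakeWhile_clean (t rest : List Char) (ht : '\n' ∉ t)
    (hrest : rest = [] ∨ ∃ T, rest = '\n' :: T) :
    (t ++ rest).takeWhile (fun d => d ≠ '\n') = t ∧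
    (t ++ rest).dropWhile (fun d => d ≠ '\n') = rest := by
  induction t with
  | nil =>
    rcases hrest with rfl | ⟨T, rfl⟩ <;> simp
  | cons c t ih =>
    have hc : c ≠ '\n' := fun h => ht (h ▸ List.mem_cons_self)
    have := ih (fun h => ht (List.mem_cons_of_mem _ h))
    have hpc : decide (c ≠ '\n') = true := decide_eq_true hc
    rw [List.cons_append]
    refine ⟨?_, ?_⟩
    · rw [List.takeWhile_cons, hpc, this.1]; simp
    · rw [List.dropWhile_cons, hpc, this.2]; simp

-- the scanner on one heading line '## t' followed by rest (empty or starting at a newline)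
theorem pvScan_heading (t rest : List Char) (ht : '\n' ∉ t)
    (hrest : rest = [] ∨ ∃ T, rest = '\n' :: T) :
    pvScanSub true (('#' :: '#' :: ' ' :: t) ++ rest)
      = "<a id=\"".toList
          ++ PySem.Chars.replace (PySem.Chars.lower (PySem.Chars.strip t)) [' '] ['-']
          ++ "\"></a>".toList ++ ['\n']
          ++ ('#' :: '#' :: ' ' :: t) ++ pvScanSub false rest := by
  rw [List.cons_append, pvScanSub]
  have hcl := pvTakeWhile_clean t rest ht hrest
  have hcond : (true && ('#' == '#') && ((('#' :: ' ' :: t) ++ rest).take 2 == ['#', ' '])) = true := by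
    simp [List.take]
  rw [if_pos hcond]
  have h2 : (('#' :: ' ' :: t) ++ rest).drop 2 = t ++ rest := by simp [List.drop]
  rw [h2, hcl.1, hcl.2]

-- the scanner copies a '\n'-free non-heading line verbatim
theorem pvScan_line (l rest : List Char) (hl : '\n' ∉ l)
    (hns : ¬ PySem.Chars.startswith l ['#', '#', ' '] = true)
    (hrest : rest = [] ∨ ∃ T, rest = '\n' :: T) :
    pvScanSub true (l ++ rest) = l ++ pvScanSub false rest := by
  cases l with
  | nil =>
    rcases hrest with rfl | ⟨T, rfl⟩
    · simp [pvScanSub]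
    · rw [List.nil_append, pvScanSub, if_neg (by simp), List.nil_append, pvScan_false_nl]
      simp
  | cons c m =>
    rw [List.cons_append, pvScanSub]
    have hcond : ¬ ((true && (c == '#') && ((m ++ rest).take 2 == ['#', ' '])) = true) := by
      intro hcontra
      simp only [Bool.and_eq_true, beq_iff_eq] at hcontra
      obtain ⟨⟨-, hc⟩, htake⟩ := hcontra
      subst hc
      rcases m with _ | ⟨d, _ | ⟨e, m''⟩⟩
      · rcases hrest with rfl | ⟨T, rfl⟩ <;> simp at htake
      · rcases hrest with rfl | ⟨T, rfl⟩ <;> simp [List.take] at htake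
      · simp only [List.cons_append, List.take] at htake
        have hd : d = '#' := by injection htake
        have he : e = ' ' := by injection htake with _ h'; injection h'
        subst hd; subst he
        exact hns (by
          rw [PySem.Chars.startswith_iff]
          exact ⟨m'', rfl⟩)
    rw [if_neg hcond]
    have hc : c ≠ '\n' := fun h => hl (h ▸ List.mem_cons_self)
    have hcb : (c == '\n') = false := by simp [hc]
    rw [hcb, pvScan_false_app m rest (fun h => hl (List.mem_cons_of_mem _ h))]
    simp

theorem pvLineOut_ne_nil (l : List Char) : pvLineOut l ≠ [] := by
  unfold pvLineOut; split <;> simp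

theorem pvFlatMap_ne_nil (ls : List (List Char)) (h : ls ≠ []) :
    ls.flatMap pvLineOut ≠ [] := by
  cases ls with
  | nil => exact absurd rfl h
  | cons x xs =>
    simp only [List.flatMap_cons]
    intro hcontra
    exact pvLineOut_ne_nil x (List.append_eq_nil_iff.mp hcontra).1

-- join then scan = per-line transform then join
theorem pvScan_join (lines : List (List Char)) (hne : lines ≠ [])
    (hnl : ∀ l ∈ lines, '\n' ∉ l) :
    pvScanSub true (PySem.Chars.join ['\n'] lines)
      = PySem.Chars.join ['\n'] (lines.flatMap pvLineOut) := by
  induction lines with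
  | nil => exact absurd rfl hne
  | cons l ls ih =>
    have hl : '\n' ∉ l := hnl l (by simp)
    by_cases hls : ls = []
    · subst hls
      rw [PySem.Chars.join_singleton]
      simp only [List.flatMap_cons, List.flatMap_nil, List.append_nil]
      by_cases hs : PySem.Chars.startswith l ['#', '#', ' '] = true
      · obtain ⟨t, rfl⟩ : ∃ t, l = '#' :: '#' :: ' ' :: t := by
          rcases (PySem.Chars.startswith_iff l ['#', '#', ' ']).mp hs with ⟨t, ht⟩
          exact ⟨t, ht.symm⟩
        have ht : '\n' ∉ t := fun h => hl (by simp [h])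
        have := pvScan_heading t [] ht (Or.inl rfl)
        simp only [List.append_nil] at this
        rw [this]
        unfold pvLineOut
        rw [if_pos hs, PySem.Chars.join_cons_cons, PySem.Chars.join_singleton]
        simp [pvScanSub, List.drop]
      · have := pvScan_line l [] hl hs (Or.inl rfl)
        simp only [List.append_nil] at this
        rw [this]
        unfold pvLineOut
        rw [if_neg hs, PySem.Chars.join_singleton]
        simp [pvScanSub]
    · obtain ⟨y, ys, rfl⟩ : ∃ y ys, ls = y :: ys := by
        cases ls with
        | nil => exact absurd rfl hls
        | cons y ys => exact ⟨y, ys, rfl⟩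
      rw [PySem.Chars.join_cons_cons]
      have hjoin : l ++ ['\n'] ++ PySem.Chars.join ['\n'] (y :: ys)
          = l ++ ('\n' :: PySem.Chars.join ['\n'] (y :: ys)) := by simp
      rw [hjoin]
      have ihls := ih (by simp) (fun x hx => hnl x (by simp [hx]))
      obtain ⟨z, zs, hz⟩ : ∃ z zs, (y :: ys).flatMap pvLineOut = z :: zs := by
        cases hzz : (y :: ys).flatMap pvLineOut with
        | nil => exact absurd hzz (pvFlatMap_ne_nil _ (by simp))
        | cons z zs => exact ⟨z, zs, rfl⟩
      by_cases hs : PySem.Chars.startswith l ['#', '#', ' '] = true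
      · obtain ⟨t, rfl⟩ : ∃ t, l = '#' :: '#' :: ' ' :: t := by
          rcases (PySem.Chars.startswith_iff l ['#', '#', ' ']).mp hs with ⟨t, ht⟩
          exact ⟨t, ht.symm⟩
        have ht : '\n' ∉ t := fun h => hl (by simp [h])
        have hlo : pvLineOut ('#' :: '#' :: ' ' :: t)
            = ["<a id=\"".toList
                 ++ PySem.Chars.replace
                      (PySem.Chars.lower (PySem.Chars.strip (('#' :: '#' :: ' ' :: t).drop 3))) [' '] ['-']
                 ++ "\"></a>".toList,
               '#' :: '#' :: ' ' :: t] := by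
          unfold pvLineOut; rw [if_pos hs]
        rw [pvScan_heading t _ ht (Or.inr ⟨_, rfl⟩), pvScan_false_nl, ihls]
        conv_rhs => rw [List.flatMap_cons, hlo, hz]
        simp only [List.cons_append, List.nil_append]
        rw [PySem.Chars.join_cons_cons, PySem.Chars.join_cons_cons, ← hz]
        simp [List.drop]
      · have hlo : pvLineOut l = [l] := by unfold pvLineOut; rw [if_neg hs]
        rw [pvScan_line l _ hl hs (Or.inr ⟨_, rfl⟩), pvScan_false_nl, ihls]
        conv_rhs => rw [List.flatMap_cons, hlo, hz]
        simp only [List.cons_append, List.nil_append]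
        rw [PySem.Chars.join_cons_cons, ← hz]
        simp

-- ===== VERDICT (by name: the statement is the Claim_ definition above) =====
theorem add_heading_anchors_spec : Claim_equal_add_heading_anchors := by
  intro content _
  unfold Spec_add_heading_anchors add_heading_anchors add_heading_anchors_alt
  dsimp only
  rw [pvFoldl_flatMap, pvSplitOn_eq]
  simp only [List.nil_append]
  have h1 : pvScanSub true content.toList
      = pvScanSub true (PySem.Chars.join ['\n'] (pvSplitNL content.toList)) := by
    rw [pvSplitNL_join]
  rw [h1, pvScan_join _ (pvSplitNL_ne_nil _) (pvSplitNL_no_nl _)]
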